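-- pv_equiv track=rewrite | github.com/timshenkao/interview_coding_exercises | python_code/easy/412_Fizz_Buzz_easy/solution.py | fizz_buzz_lookup
-- ===== SOURCE A (Python) =====
-- from collections import OrderedDict
-- from typing import List
--
-- def fizz_buzz_lookup(n: int) -> List[str]:
--     """ Time complexity: O(n). We iterate from 1 to n. We perform fixed amount of computations on each iteration.
--         Space complexity: O(n). We create output list of strings.
--     """
--     # Lookup for all fizzbuzz mappings
--     fizz_buzz_dict = OrderedDict({3: "Fizz", 5: "Buzz"})
--
--     result = list()
--     i_result = list()
--     for i in range(1, n + 1):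
--         i_result.clear()
--         for key in fizz_buzz_dict.keys():
--             # If the number is divisible by key,
--             # then add the corresponding string mapping to current i_result
--             if i % key == 0:
--                 i_result.append(fizz_buzz_dict[key])
--
--         if not i_result:
--             i_result.append(str(i))
--         result.append("".join(i_result))
--     return result
-- ===== SOURCE B (Python) =====
-- from typing import List
--
--
-- def _fizz_buzz(i: int) -> str:
--     if i % 15 == 0:
--         return "FizzBuzz"
--     if i % 3 == 0:
--         return "Fizz"
--     if i % 5 == 0:
--         return "Buzz"
--     return str(i)
--
--
-- def fizz_buzz_lookup(n: int) -> List[str]: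
--     return [_fizz_buzz(i) for i in range(1, n + 1)]
-- ===== Notes on version B (the rewrite author's own statement) =====
-- stated objective: idiomatic
-- what changed: Replaced the OrderedDict lookup with its inner per-key token loop, the mutable i_result buffer and the join, by a direct if/elif chain (15/3/5/else) computing each element in one branch, mapped over the range.
import Mathlib
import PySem

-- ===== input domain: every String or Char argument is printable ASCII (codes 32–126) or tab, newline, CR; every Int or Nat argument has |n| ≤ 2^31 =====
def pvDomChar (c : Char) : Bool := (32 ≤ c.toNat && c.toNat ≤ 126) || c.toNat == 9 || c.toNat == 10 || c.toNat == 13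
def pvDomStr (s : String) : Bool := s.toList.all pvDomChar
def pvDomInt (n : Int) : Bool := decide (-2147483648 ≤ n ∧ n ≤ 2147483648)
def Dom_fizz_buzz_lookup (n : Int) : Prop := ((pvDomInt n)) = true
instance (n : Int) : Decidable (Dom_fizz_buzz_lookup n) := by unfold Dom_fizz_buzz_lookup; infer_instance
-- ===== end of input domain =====

-- B replaces A's OrderedDict lookup + token buffer + join by a direct if/elif chain per element (idiomatic, no speed claim proved).

-- ===== PORT A =====
-- fizz_buzz_dict = OrderedDict({3: "Fizz", 5: "Buzz"})
def pvFizzBuzzDict : PySem.Dict Int String :=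
  PySem.Dict.ofList [(3, "Fizz"), (5, "Buzz")]

def fizz_buzz_lookup (n : Int) : List String :=
  (PySem.List.pyRange 1 (n + 1) 1).foldl
    (fun result i =>
      -- i_result.clear(); for key in fizz_buzz_dict.keys(): …
      let i_result : List String :=
        (PySem.Dict.keys pvFizzBuzzDict).foldl
          (fun acc key =>
            if PySem.Int.mod i key = 0 then acc ++ [pvFizzBuzzDict.getD key ""] else acc)
          []
      let i_result := if i_result = [] then [PySem.Int.toStr i] else i_result
      result ++ [PySem.Str.join "" i_result])
    []

-- ===== PORT B =====
def pvFizzBuzzOf (i : Int) : String :=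
  if PySem.Int.mod i 15 = 0 then "FizzBuzz"
  else if PySem.Int.mod i 3 = 0 then "Fizz"
  else if PySem.Int.mod i 5 = 0 then "Buzz"
  else PySem.Int.toStr i

def fizz_buzz_lookup_alt (n : Int) : List String :=
  (PySem.List.pyRange 1 (n + 1) 1).map pvFizzBuzzOf

-- ===== PRECONDITION & SPEC =====
def Spec_fizz_buzz_lookup (n : Int) (out : List String) : Prop := out = fizz_buzz_lookup_alt n
instance (n : Int) (out : List String) : Decidable (Spec_fizz_buzz_lookup n out) := by unfold Spec_fizz_buzz_lookup; infer_instance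

-- ===== CLAIM (what is proved, stated in full; the proofs are below) =====
def Claim_equal_fizz_buzz_lookup : Prop := ∀ (n : Int), Dom_fizz_buzz_lookup n → Spec_fizz_buzz_lookup n (fizz_buzz_lookup n)

-- ===== LEMMAS AND PROOFS =====

-- A's per-element computation (tokens then join) equals B's branch chain.
theorem pvElem_eq (i : Int) :
    PySem.Str.join ""
      (let i_result : List String :=
        (PySem.Dict.keys pvFizzBuzzDict).foldl
          (fun acc key =>
            if PySem.Int.mod i key = 0 then acc ++ [pvFizzBuzzDict.getD key ""] else acc)
          []
       if i_result = [] then [PySem.Int.toStr i] else i_result)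
    = pvFizzBuzzOf i := by
  have h3 : PySem.Int.mod i 3 = i % 3 := PySem.Int.mod_eq_emod_of_pos (by norm_num)
  have h5 : PySem.Int.mod i 5 = i % 5 := PySem.Int.mod_eq_emod_of_pos (by norm_num)
  have h15 : PySem.Int.mod i 15 = i % 15 := PySem.Int.mod_eq_emod_of_pos (by norm_num)
  have hiff : i % 15 = 0 ↔ (i % 3 = 0 ∧ i % 5 = 0) := by omega
  have hk : PySem.Dict.keys pvFizzBuzzDict = [3, 5] := by decide
  have g3 : pvFizzBuzzDict.getD 3 "" = "Fizz" := by decide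
  have g5 : pvFizzBuzzDict.getD 5 "" = "Buzz" := by decide
  have hj1 : ∀ s : String, PySem.Str.join "" [s] = s := fun s => by
    simp [PySem.Str.join, PySem.Chars.join, List.intercalate]
  have hjFB : PySem.Str.join "" ["Fizz", "Buzz"] = "FizzBuzz" := by decide
  simp only [pvFizzBuzzOf, hk, List.foldl, h3, h5, h15, g3, g5]
  by_cases ha : i % 3 = 0 <;> by_cases hb : i % 5 = 0 <;>
    simp [ha, hb, hiff, hj1, hjFB]

-- ===== VERDICT (by name: the statement is the Claim_ definition above) =====
theorem fizz_buzz_lookup_spec : Claim_equal_fizz_buzz_lookup := by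
  intro n _
  unfold Spec_fizz_buzz_lookup fizz_buzz_lookup fizz_buzz_lookup_alt
  rw [PySem.List.foldl_append_singleton_eq_map]
  exact List.map_congr_left fun i _ => pvElem_eq i
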